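-- pv_equiv track=rewrite | github.com/jewerlykim/python_Algorithm | codingtest/eatingLiveECOTE copy.py | solution
-- ===== SOURCE A (Python) =====
-- import heapq
--
-- def solution(food_times, k):
--     if sum(food_times) <= k:
--         return -1
--
--     queue = []
--     for i, v in enumerate(food_times):
--         heapq.heappush(queue, (v, i+1))
--     sum_value = 0
--     previous = 0
--     length = len(food_times)
--
--     while sum_value + ((queue[0][0] - previous) * length) <= k:
--         now = heapq.heappop(queue)[0]
--         sum_value += (now - previous) * length
--         length -= 1
--         previous = now
--
--     result = sorted(queue, key=lambda x: x[1])
--     return result[(k-sum_value) % length][1]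
-- ===== SOURCE B (Python) =====
-- def solution(food_times, k):
--     if sum(food_times) <= k:
--         return -1
--     n = len(food_times)
--
--     def cost(v):
--         # seconds spent if every food is eaten down by at most v units
--         return sum(min(t, v) for t in food_times)
--
--     # binary search the largest v with cost(v) <= k; invariant cost(lo) <= k < cost(hi)
--     lo = min(min(food_times), k // n)
--     hi = max(food_times)
--     while lo + 1 < hi:
--         mid = (lo + hi) // 2
--         if cost(mid) <= k:
--             lo = mid
--         else:
--             hi = mid
--
--     rem = [i + 1 for i, t in enumerate(food_times) if t > lo]
--     return rem[(k - cost(lo)) % len(rem)]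
-- ===== Notes on version B (the rewrite author's own statement) =====
-- stated objective: alternative
-- what changed: Replaces A's heap simulation of the eating process (pop foods in increasing time, accumulate elapsed seconds) by a parametric binary search on the per-food consumption level v with cost(v) = sum(min(t, v)): find the largest v with cost(v) <= k, then index the foods with t > v (in original order) at (k - cost(v)) % count; no heap, no sort, no simulation of the eating order.
import Mathlib
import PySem

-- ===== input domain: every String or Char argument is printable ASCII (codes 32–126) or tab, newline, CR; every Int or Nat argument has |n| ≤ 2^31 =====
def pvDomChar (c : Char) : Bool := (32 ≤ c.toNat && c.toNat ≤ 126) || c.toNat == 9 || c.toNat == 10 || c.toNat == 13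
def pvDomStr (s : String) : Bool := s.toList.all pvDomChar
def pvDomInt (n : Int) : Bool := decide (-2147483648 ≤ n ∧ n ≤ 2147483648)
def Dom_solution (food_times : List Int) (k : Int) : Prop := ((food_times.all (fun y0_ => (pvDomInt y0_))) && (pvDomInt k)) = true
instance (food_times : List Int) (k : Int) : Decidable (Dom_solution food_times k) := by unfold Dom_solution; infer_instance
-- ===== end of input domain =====

-- B replaces A's heap simulation of the eating order by a binary search on the per-food
-- consumption level v with cost(v) = sum of min(t, v) — a different algorithm, similar cost.

-- ===== PORT A =====
-- heapq is not in PySem, so it is ported by hand as a functional min-heap over Python's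
-- (value, index) tuples with Python's lexicographic tuple comparison. This is observationally
-- exact for this program: heappush/heappop maintain the same multiset of tuples and
-- heappop/queue[0] return its least element, which is all `solution` observes (Python's
-- internal array layout is not itself representable as a pure list step for step).
def pairLe (a b : Int × Int) : Bool := a.1 < b.1 || (a.1 == b.1 && a.2 ≤ b.2)

inductive PairHeap : Type
  | nil : PairHeap
  | node : Int × Int → PairHeap → PairHeap → PairHeap

-- heappush: sift the new element against the root, rotating subtrees (structural recursion)
def heappush : PairHeap → (Int × Int) → PairHeap
  | .nil, x => .node x .nil .nil
  | .node a l r, x => if pairLe a x then .node a (heappush r x) l else .node x (heappush r a) l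

-- melding the two children after a heappop removes the root
def meld : PairHeap → PairHeap → PairHeap
  | .nil, h => h
  | .node a l r, h => meld l (meld r (heappush h a))

def heapToList : PairHeap → List (Int × Int)
  | .nil => []
  | .node a l r => a :: (heapToList l ++ heapToList r)

-- A's while loop; state (queue, sum_value, previous, length), returns (queue, sum_value, length).
-- The .nil case is Python's IndexError at queue[0] (excluded by Pre_solution); the fuel only
-- makes the recursion structural — one unit per heappop, and the call site passes len(food_times),
-- which the size invariant in the proofs shows is never exhausted.
def loopA (k : Int) : Nat → PairHeap → Int → Int → Int → PairHeap × Int × Int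
  | _, .nil, sum_value, _previous, length => (.nil, sum_value, length)
  | 0, q, sum_value, _previous, length => (q, sum_value, length)
  | fuel + 1, .node a l r, sum_value, previous, length =>
      if sum_value + (a.1 - previous) * length ≤ k then
        loopA k fuel (meld l r) (sum_value + (a.1 - previous) * length) a.1 (length - 1)
      else (.node a l r, sum_value, length)

-- `result = sorted(queue, key=lambda x: x[1]); return result[(k-sum_value) % length][1]`
-- (none = Python's IndexError, only reachable outside Pre_solution)
def finishA (k : Int) (r : PairHeap × Int × Int) : Int :=
  match PySem.List.pyGet? (PySem.List.sorted (heapToList r.1) (fun x => x.2) false)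
      (PySem.Int.mod (k - r.2.1) r.2.2) with
  | some p => p.2
  | none => -1

def solution (food_times : List Int) (k : Int) : Int :=
  if food_times.sum ≤ k then -1
  else
    finishA k (loopA k food_times.length
      ((PySem.List.enumerate food_times 0).foldl (fun q p => heappush q (p.2, p.1 + 1)) .nil)
      0 0 (food_times.length : Int))

-- ===== PORT B =====
-- `def cost(v): return sum(min(t, v) for t in food_times)`
def costB (food_times : List Int) (v : Int) : Int :=
  (food_times.map (fun t => min t v)).sum

-- B's `while lo + 1 < hi:` binary-search loop; terminates because hi - lo shrinks
def bsearchB (food_times : List Int) (k lo hi : Int) : Int :=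
  if _h : lo + 1 < hi then
    let mid := PySem.Int.floordiv (lo + hi) 2
    if costB food_times mid ≤ k then bsearchB food_times k mid hi
    else bsearchB food_times k lo mid
  else lo
termination_by (hi - lo).toNat
decreasing_by
  · have hb := PySem.Int.floordiv_two_mid_bounds (show lo + 1 ≤ hi - 1 by omega)
    have he : lo + 1 + (hi - 1) = lo + hi := by ring
    rw [he] at hb
    omega
  · have hb := PySem.Int.floordiv_two_mid_bounds (show lo + 1 ≤ hi - 1 by omega)
    have he : lo + 1 + (hi - 1) = lo + hi := by ring
    rw [he] at hb
    omega

-- min(food_times)/max(food_times): none = Python's ValueError on []; `k // n` with n = 0 =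
-- Python's ZeroDivisionError; the final index: none = IndexError — all only reachable
-- outside Pre_solution, where the .getD 0 / -1 defaults are arbitrary.
def solution_alt (food_times : List Int) (k : Int) : Int :=
  if food_times.sum ≤ k then -1
  else
    let n : Int := food_times.length
    let lo := min ((PySem.List.min? food_times (fun t => t)).getD 0) (PySem.Int.floordiv k n)
    let hi := (PySem.List.max? food_times (fun t => t)).getD 0
    let v := bsearchB food_times k lo hi
    let rem := ((PySem.List.enumerate food_times 0).filter (fun p => v < p.2)).map
      (fun p => p.1 + 1)
    match PySem.List.pyGet? rem (PySem.Int.mod (k - costB food_times v) (rem.length : Int)) with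
    | some r => r
    | none => -1

-- ===== PRECONDITION & SPEC =====
-- Pre_ excludes only (food_times = [] with k < 0), the sole inputs where A raises
-- (IndexError at queue[0]); A returns on every other input.
def Pre_solution (food_times : List Int) (k : Int) : Prop := food_times ≠ [] ∨ 0 ≤ k
instance (food_times : List Int) (k : Int) : Decidable (Pre_solution food_times k) := by
  unfold Pre_solution; infer_instance

def pvWitness_solution : List Int × Int := ([3, 1, 2], 5)

def Spec_solution (food_times : List Int) (k : Int) (out : Int) : Prop := out = solution_alt food_times k
instance (food_times : List Int) (k : Int) (out : Int) : Decidable (Spec_solution food_times k out) := by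
  unfold Spec_solution; infer_instance

-- ===== CLAIM (what is proved, stated in full; the proofs are below) =====
def Claim_equal_solution : Prop := ∀ (food_times : List Int) (k : Int), Dom_solution food_times k → Pre_solution food_times k → Spec_solution food_times k (solution food_times k)

-- ===== LEMMAS AND PROOFS =====

def PairHeap.size : PairHeap → Nat
  | .nil => 0
  | .node _ l r => l.size + r.size + 1

-- strict lexicographic order on Python's (value, index) tuples
def lexLt (a b : Int × Int) : Prop := a.1 < b.1 ∨ (a.1 = b.1 ∧ a.2 < b.2)

theorem pairLe_iff (a b : Int × Int) : pairLe a b = true ↔ (a.1 < b.1 ∨ (a.1 = b.1 ∧ a.2 ≤ b.2)) := by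
  rcases a with ⟨a1, a2⟩; rcases b with ⟨b1, b2⟩; simp [pairLe]

theorem pairLe_total (a b : Int × Int) : pairLe a b = true ∨ pairLe b a = true := by
  rcases a with ⟨a1, a2⟩; rcases b with ⟨b1, b2⟩; simp [pairLe]; omega

theorem pairLe_trans (a b c : Int × Int) (h1 : pairLe a b = true) (h2 : pairLe b c = true) :
    pairLe a c = true := by
  rw [pairLe_iff] at *; omega

theorem pairLe_refl (a : Int × Int) : pairLe a a = true := by rw [pairLe_iff]; omega

theorem not_lexLt_of_pairLe (a b : Int × Int) (h : pairLe a b = true) : ¬ lexLt b a := by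
  rw [pairLe_iff] at h; simp [lexLt]; omega

-- contents of push and meld, as multisets
theorem toList_heappush_multiset : ∀ (h : PairHeap) (x : Int × Int),
    (↑(heapToList (heappush h x)) : Multiset (Int × Int)) = x ::ₘ ↑(heapToList h) := by
  intro h
  induction h with
  | nil => intro x; simp [heappush, heapToList]
  | node a l r ihl ihr =>
      intro x
      by_cases hle : pairLe a x = true
      · rw [heappush, if_pos hle]
        simp only [heapToList, ← Multiset.coe_add, ← Multiset.cons_coe, ihr,
          ← Multiset.singleton_add]
        abel
      · rw [heappush, if_neg hle]
        simp only [heapToList, ← Multiset.coe_add, ← Multiset.cons_coe, ihr,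
          ← Multiset.singleton_add]
        abel

theorem toList_meld_multiset : ∀ (h1 h2 : PairHeap),
    (↑(heapToList (meld h1 h2)) : Multiset (Int × Int)) = ↑(heapToList h1) + ↑(heapToList h2) := by
  intro h1 h2
  induction h1, h2 using meld.induct with
  | case1 h => simp [meld, heapToList]
  | case2 a l r h ih1 ih2 =>
      rw [meld, ih2, ih1, toList_heappush_multiset]
      simp only [heapToList, ← Multiset.coe_add, ← Multiset.cons_coe, ← Multiset.singleton_add]
      try abel

theorem toList_meld_perm (h1 h2 : PairHeap) :
    (heapToList (meld h1 h2)).Perm (heapToList h1 ++ heapToList h2) := by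
  rw [← Multiset.coe_eq_coe, ← Multiset.coe_add]
  exact toList_meld_multiset h1 h2

theorem toList_heappush_perm (h : PairHeap) (x : Int × Int) :
    (heapToList (heappush h x)).Perm (x :: heapToList h) := by
  rw [← Multiset.coe_eq_coe, ← Multiset.cons_coe]
  exact toList_heappush_multiset h x

theorem mem_toList_heappush (h : PairHeap) (x y : Int × Int) :
    y ∈ heapToList (heappush h x) ↔ y = x ∨ y ∈ heapToList h := by
  rw [(toList_heappush_perm h x).mem_iff]
  simp

-- heap sizes
theorem size_eq_length_toList : ∀ (h : PairHeap), h.size = (heapToList h).length := by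
  intro h
  induction h with
  | nil => simp [PairHeap.size, heapToList]
  | node a l r ihl ihr => simp [PairHeap.size, heapToList, ihl, ihr]; try omega

theorem size_meld (h1 h2 : PairHeap) : (meld h1 h2).size = h1.size + h2.size := by
  have := (toList_meld_perm h1 h2).length_eq
  simp only [size_eq_length_toList, List.length_append] at *
  omega

-- min-heap property
def heapOk : PairHeap → Prop
  | .nil => True
  | .node a l r => (∀ x ∈ heapToList l, pairLe a x = true) ∧
      (∀ x ∈ heapToList r, pairLe a x = true) ∧ heapOk l ∧ heapOk r

theorem heapOk_heappush : ∀ (h : PairHeap), heapOk h → ∀ (x : Int × Int), heapOk (heappush h x) := by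
  intro h
  induction h with
  | nil => intro _ x; simp [heappush, heapOk, heapToList]
  | node a l r ihl ihr =>
      intro hok x
      obtain ⟨hal, har, hol, hor⟩ := hok
      by_cases hle : pairLe a x = true
      · rw [heappush, if_pos hle]
        refine ⟨?_, hal, ihr hor x, hol⟩
        intro y hy
        rcases (mem_toList_heappush r x y).mp hy with rfl | hy
        · exact hle
        · exact har y hy
      · have hxa : pairLe x a = true := by
          rcases pairLe_total a x with h' | h'
          · exact absurd h' hle
          · exact h'
        rw [heappush, if_neg hle]
        refine ⟨?_, ?_, ihr hor a, hol⟩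
        · intro y hy
          rcases (mem_toList_heappush r a y).mp hy with rfl | hy
          · exact hxa
          · exact pairLe_trans x a y hxa (har y hy)
        · intro y hy
          exact pairLe_trans x a y hxa (hal y hy)

theorem heapOk_meld : ∀ (h1 h2 : PairHeap), heapOk h1 → heapOk h2 → heapOk (meld h1 h2) := by
  intro h1 h2
  induction h1, h2 using meld.induct with
  | case1 h => intro _ hb; simpa [meld] using hb
  | case2 a l r h ih1 ih2 =>
      intro ha hb
      obtain ⟨hal, har, hol, hor⟩ := ha
      rw [meld]
      exact ih2 hol (ih1 hor (heapOk_heappush h hb a))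

theorem heapOk_root_le (a : Int × Int) (l r : PairHeap) (h : heapOk (.node a l r)) :
    ∀ x ∈ heapToList (.node a l r), pairLe a x = true := by
  intro x hx
  obtain ⟨hal, har, _, _⟩ := h
  simp only [heapToList, List.mem_cons, List.mem_append] at hx
  rcases hx with hx | hx | hx
  · exact hx ▸ pairLe_refl a
  · exact hal x hx
  · exact har x hx

theorem foldl_push_ok : ∀ (P : List (Int × Int)) (q : PairHeap), heapOk q →
    heapOk (P.foldl heappush q) ∧ (heapToList (P.foldl heappush q)).Perm (heapToList q ++ P) := by
  intro P
  induction P with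
  | nil => intro q hq; exact ⟨hq, by simp⟩
  | cons x P ih =>
      intro q hq
      obtain ⟨hok, hperm⟩ := ih (heappush q x) (heapOk_heappush q hq x)
      refine ⟨by simpa using hok, ?_⟩
      have h1 : (heapToList (heappush q x)).Perm (heapToList q ++ [x]) :=
        (toList_heappush_perm q x).trans (List.perm_append_singleton x (heapToList q)).symm
      have h2 : (heapToList ((x :: P).foldl heappush q)).Perm (heapToList (heappush q x) ++ P) := by
        simpa using hperm
      have h3 := h2.trans (h1.append_right P)
      simpa using h3

-- reference model of A's loop: the same sweep over the value-sorted pair list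
def sweep (k : Int) (s : List (Int × Int)) (sum_value previous length : Int) :
    List (Int × Int) × Int × Int :=
  match s with
  | [] => ([], sum_value, length)
  | x :: rest =>
      if sum_value + (x.1 - previous) * length ≤ k then
        sweep k rest (sum_value + (x.1 - previous) * length) x.1 (length - 1)
      else (x :: rest, sum_value, length)

-- simulation: A's heap loop ≡ the sweep over the strictly sorted list
theorem sim (k : Int) : ∀ (n : Nat) (q : PairHeap) (s : List (Int × Int)) (sv prev len : Int),
    q.size = n → heapOk q → (heapToList q).Perm s → s.Pairwise lexLt →
    (loopA k n q sv prev len).2.1 = (sweep k s sv prev len).2.1 ∧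
    (loopA k n q sv prev len).2.2 = (sweep k s sv prev len).2.2 ∧
    (heapToList (loopA k n q sv prev len).1).Perm (sweep k s sv prev len).1 := by
  intro n
  induction n using Nat.strong_induction_on with
  | _ n ih =>
    intro q s sv prev len hn hok hperm hpw
    cases q with
    | nil =>
        have hs : s = [] := hperm.symm.eq_nil
        subst hs
        cases n <;> simp [loopA, sweep, heapToList]
    | node a l r =>
        cases s with
        | nil =>
            have := hperm.eq_nil
            simp [heapToList] at this
        | cons m t =>
            obtain ⟨n', rfl⟩ : ∃ n', n = n' + 1 := by
              rcases n with _ | n'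
              · simp [PairHeap.size] at hn
              · exact ⟨n', rfl⟩
            have ham : a = m := by
              have hminA : pairLe a m = true :=
                heapOk_root_le a l r hok m (hperm.mem_iff.mpr List.mem_cons_self)
              have haS : a ∈ m :: t := hperm.mem_iff.mp (by simp [heapToList])
              rcases List.mem_cons.mp haS with h | h
              · exact h
              · exact absurd ((List.pairwise_cons.mp hpw).1 a h)
                  (not_lexLt_of_pairLe a m hminA)
            subst ham
            obtain ⟨hal, har, hol, hor⟩ := hok
            have hperm' : (heapToList (meld l r)).Perm t := by
              have hc : (heapToList l ++ heapToList r).Perm t := by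
                have : (a :: (heapToList l ++ heapToList r)).Perm (a :: t) := hperm
                exact this.cons_inv
              exact (toList_meld_perm l r).trans hc
            by_cases hc : sv + (a.1 - prev) * len ≤ k
            · have hA : loopA k (n' + 1) (.node a l r) sv prev len =
                  loopA k n' (meld l r) (sv + (a.1 - prev) * len) a.1 (len - 1) := by
                rw [loopA]; simp [hc]
              have hB : sweep k (a :: t) sv prev len =
                  sweep k t (sv + (a.1 - prev) * len) a.1 (len - 1) := by
                rw [sweep]; simp [hc]
              rw [hA, hB]
              have hsz : (meld l r).size = n' := by
                rw [size_meld]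
                simp [PairHeap.size] at hn
                omega
              exact ih n' (Nat.lt_succ_self n') (meld l r) t _ _ _ hsz
                (heapOk_meld l r hol hor) hperm' hpw.of_cons
            · have hA : loopA k (n' + 1) (.node a l r) sv prev len = (.node a l r, sv, len) := by
                rw [loopA]; simp [hc]
              have hB : sweep k (a :: t) sv prev len = (a :: t, sv, len) := by
                rw [sweep]; simp [hc]
              rw [hA, hB]
              exact ⟨rfl, rfl, hperm⟩

-- sum of the values of a pair list
def Sval (s : List (Int × Int)) : Int := (s.map (fun p => p.1)).sum

-- the cost function of B, read on the (value, index) pair list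
def costP (s : List (Int × Int)) (v : Int) : Int := (s.map (fun p => min p.1 v)).sum

theorem costP_perm (s t : List (Int × Int)) (h : s.Perm t) (v : Int) : costP s v = costP t v := by
  unfold costP
  exact (h.map (fun p => min p.1 v)).sum_eq

theorem costB_mono (ft : List Int) (v w : Int) (h : v ≤ w) : costB ft v ≤ costB ft w := by
  induction ft with
  | nil => simp [costB]
  | cons t ft ih =>
      simp only [costB, List.map_cons, List.sum_cons] at *
      have : min t v ≤ min t w := by omega
      omega

theorem costB_of_le (ft : List Int) (v : Int) (h : ∀ t ∈ ft, v ≤ t) :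
    costB ft v = v * ft.length := by
  induction ft with
  | nil => simp [costB]
  | cons t ft ih =>
      have ht : min t v = v := by have := h t List.mem_cons_self; omega
      simp only [costB, List.map_cons, List.sum_cons, ht, List.length_cons] at *
      rw [ih (fun y hy => h y (List.mem_cons_of_mem t hy))]
      push_cast
      ring

theorem costB_of_ge (ft : List Int) (v : Int) (h : ∀ t ∈ ft, t ≤ v) :
    costB ft v = ft.sum := by
  induction ft with
  | nil => simp [costB]
  | cons t ft ih =>
      have ht : min t v = t := by have := h t List.mem_cons_self; omega
      simp only [costB, List.map_cons, List.sum_cons, ht] at *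
      rw [ih (fun y hy => h y (List.mem_cons_of_mem t hy))]

-- costP of the enumerated pair list is costB
theorem costP_P_aux (ft : List Int) (v : Int) : ∀ s : Int,
    costP ((PySem.List.enumerate ft s).map (fun p => (p.2, p.1 + 1))) v = costB ft v := by
  induction ft with
  | nil => intro s; simp [costP, costB]
  | cons t ft ih =>
      intro s
      rw [PySem.List.enumerate_cons]
      simp only [List.map_cons, costP, costB, List.sum_cons]
      have h := ih (s + 1)
      simp only [costP, costB] at h
      rw [h]

theorem costP_P (ft : List Int) (v : Int) :
    costP ((PySem.List.enumerate ft 0).map (fun p => (p.2, p.1 + 1))) v = costB ft v :=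
  costP_P_aux ft v 0

theorem Sval_P_aux (ft : List Int) : ∀ s : Int,
    Sval ((PySem.List.enumerate ft s).map (fun p => (p.2, p.1 + 1))) = ft.sum := by
  induction ft with
  | nil => intro s; simp [Sval]
  | cons t ft ih =>
      intro s
      rw [PySem.List.enumerate_cons]
      simp only [List.map_cons, Sval, List.sum_cons]
      have h := ih (s + 1)
      simp only [Sval] at h
      rw [h]

theorem Sval_P (ft : List Int) :
    Sval ((PySem.List.enumerate ft 0).map (fun p => (p.2, p.1 + 1))) = ft.sum :=
  Sval_P_aux ft 0

-- the piecewise-linear form of costP at a split point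
theorem costP_split (done s : List (Int × Int)) (v : Int)
    (hd : ∀ d ∈ done, d.1 ≤ v) (hs : ∀ x ∈ s, v ≤ x.1) :
    costP (done ++ s) v = Sval done + v * s.length := by
  induction done with
  | nil =>
      simp only [List.nil_append, Sval, List.map_nil, List.sum_nil, Int.zero_add]
      induction s with
      | nil => simp [costP]
      | cons x s ih =>
          have hx : min x.1 v = v := by
            have := hs x List.mem_cons_self; omega
          simp only [costP, List.map_cons, List.sum_cons, hx, List.length_cons] at *
          rw [ih (fun y hy => hs y (List.mem_cons_of_mem x hy))]
          push_cast
          ring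
  | cons d done ih =>
      have hd1 : min d.1 v = d.1 := by
        have := hd d List.mem_cons_self; omega
      simp only [List.cons_append, costP, List.map_cons, List.sum_cons, hd1, Sval] at *
      rw [ih (fun y hy => hd y (List.mem_cons_of_mem d hy))]
      ring

-- values are nondecreasing along a lexLt-pairwise list
theorem lexLt_val_le (a b : Int × Int) (h : lexLt a b) : a.1 ≤ b.1 := by
  rcases h with h | ⟨h, _⟩ <;> omega

-- characterization of the sweep's final state
theorem sweep_post (k : Int) : ∀ (s : List (Int × Int)) (sv prev : Int) (done : List (Int × Int)),
    (done ++ s).Pairwise lexLt →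
    sv = Sval done + prev * s.length →
    (∀ d ∈ done, d.1 ≤ prev) →
    ((done = [] ∧ prev = 0) ∨ ((∀ x ∈ s, prev ≤ x.1) ∧ sv ≤ k)) →
    ∃ done' prev' s',
      sweep k s sv prev s.length = (s', Sval done' + prev' * s'.length, (s'.length : Int)) ∧
      done ++ s = done' ++ s' ∧
      (∀ d ∈ done', d.1 ≤ prev') ∧
      ((done' = [] ∧ prev' = 0) ∨
        ((∀ x ∈ s', prev' ≤ x.1) ∧ Sval done' + prev' * s'.length ≤ k)) ∧
      (∀ x rest, s' = x :: rest →
        ¬ (Sval done' + prev' * s'.length + (x.1 - prev') * s'.length ≤ k)) := by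
  intro s
  induction s with
  | nil =>
      intro sv prev done hpw hsv hd hcase
      refine ⟨done, prev, [], ?_, by simp, hd, ?_, by intro x rest h; cases h⟩
      · simp only [List.length_nil, Int.natCast_zero] at hsv ⊢
        rw [sweep, hsv]
      · rcases hcase with h | ⟨_, h2⟩
        · exact Or.inl h
        · refine Or.inr ⟨by simp, ?_⟩
          simp only [List.length_nil, Int.natCast_zero, Int.mul_zero] at hsv ⊢
          omega
  | cons x rest ih =>
      intro sv prev done hpw hsv hd hcase
      by_cases hc : sv + (x.1 - prev) * ((x :: rest).length : Int) ≤ k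
      · have hstep : sweep k (x :: rest) sv prev ((x :: rest).length : Int) =
            sweep k rest (sv + (x.1 - prev) * ((x :: rest).length : Int)) x.1
              ((rest.length : Int)) := by
          rw [sweep, if_pos hc]
          norm_num
        rw [hstep]
        have hpw' : (done ++ [x] ++ rest).Pairwise lexLt := by
          rw [List.append_assoc]
          simpa using hpw
        have hxrest : ∀ y ∈ rest, x.1 ≤ y.1 := by
          have hxr : (x :: rest).Pairwise lexLt := (List.pairwise_append.mp hpw).2.1
          intro y hy
          exact lexLt_val_le x y ((List.pairwise_cons.mp hxr).1 y hy)
        have hdx : ∀ d ∈ done ++ [x], d.1 ≤ x.1 := by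
          intro d hdmem
          rcases List.mem_append.mp hdmem with hdm | hdm
          · rcases hcase with ⟨hde, _⟩ | ⟨hall, _⟩
            · subst hde; simp at hdm
            · exact le_trans (hd d hdm) (hall x List.mem_cons_self)
          · simp only [List.mem_singleton] at hdm
            subst hdm
            exact le_refl _
        have hsv' : sv + (x.1 - prev) * ((x :: rest).length : Int)
            = Sval (done ++ [x]) + x.1 * rest.length := by
          rw [hsv]
          simp only [Sval, List.map_append, List.sum_append, List.map_cons, List.map_nil,
            List.sum_cons, List.sum_nil, List.length_cons]
          push_cast
          ring
        obtain ⟨d', p', s', h1, h2, h3, h4, h5⟩ := ih _ x.1 (done ++ [x]) hpw' hsv'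
          hdx (Or.inr ⟨hxrest, hc⟩)
        refine ⟨d', p', s', h1, ?_, h3, h4, h5⟩
        rw [← h2, List.append_assoc]
        rfl
      · refine ⟨done, prev, x :: rest, ?_, rfl, hd, ?_, ?_⟩
        · rw [sweep, if_neg hc, hsv]
        · rcases hcase with h | ⟨h1, h2⟩
          · exact Or.inl h
          · exact Or.inr ⟨h1, by rw [← hsv]; exact h2⟩
        · intro y t hy
          cases hy
          rw [← hsv]
          exact hc

-- the binary search lands on the largest v with cost ≤ k
theorem bsearch_post (ft : List Int) (k : Int) : ∀ (n : Nat) (lo hi : Int),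
    (hi - lo).toNat = n → lo < hi → costB ft lo ≤ k → k < costB ft hi →
    costB ft (bsearchB ft k lo hi) ≤ k ∧ k < costB ft (bsearchB ft k lo hi + 1) := by
  intro n
  induction n using Nat.strong_induction_on with
  | _ n ih =>
    intro lo hi hn hlt hlo hhi
    rw [bsearchB]
    by_cases h : lo + 1 < hi
    · simp only [h, dif_pos]
      have hb := PySem.Int.floordiv_two_mid_bounds (show lo + 1 ≤ hi - 1 by omega)
      have he : lo + 1 + (hi - 1) = lo + hi := by ring
      rw [he] at hb
      by_cases hcm : costB ft (PySem.Int.floordiv (lo + hi) 2) ≤ k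
      · simp only [hcm, if_pos]
        exact ih ((hi - PySem.Int.floordiv (lo + hi) 2).toNat) (by omega) _ hi rfl
          (by omega) hcm hhi
      · simp only [hcm, if_neg, not_false_iff]
        exact ih ((PySem.Int.floordiv (lo + hi) 2 - lo).toNat) (by omega) lo _ rfl
          (by omega) hlo (by omega)
    · simp only [h, dif_neg, not_false_iff]
      have : hi = lo + 1 := by omega
      subst this
      exact ⟨hlo, hhi⟩

-- xs[i] commutes with map
theorem pyGet?_map {α β : Type} (f : α → β) (xs : List α) (i : Int) :
    PySem.List.pyGet? (xs.map f) i = (PySem.List.pyGet? xs i).map f := by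
  simp [PySem.List.pyGet?, PySem.List.pyIdx?]

-- ===== VERDICT (by name: the statement is the Claim_ definition above) =====
theorem solution_spec : Claim_equal_solution := by
  intro ft k _hdom hpre
  unfold Spec_solution
  by_cases hsum : ft.sum ≤ k
  · simp [solution, solution_alt, hsum]
  · have hftne : ft ≠ [] := by
      rintro rfl
      rcases hpre with h | h
      · exact h rfl
      · simp at hsum
        omega
    simp only [solution, solution_alt, if_neg hsum]
    -- name B's binary-search result before anything else is rewritten
    set v := bsearchB ft k
      (min ((PySem.List.min? ft (fun t => t)).getD 0) (PySem.Int.floordiv k (ft.length : Int)))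
      ((PySem.List.max? ft (fun t => t)).getD 0) with hv
    -- the enumerated (value, index) pairs, and their value-sorted arrangement
    set P := (PySem.List.enumerate ft 0).map (fun p => (p.2, p.1 + 1)) with hP
    have hfold : (PySem.List.enumerate ft 0).foldl (fun q p => heappush q (p.2, p.1 + 1))
        PairHeap.nil = P.foldl heappush .nil := by
      rw [hP, List.foldl_map]
    obtain ⟨hok0, hperm0⟩ := foldl_push_ok P .nil trivial
    have hperm0' : (heapToList (P.foldl heappush PairHeap.nil)).Perm P := by simpa using hperm0
    set ys := P.mergeSort pairLe with hys
    have hysperm : ys.Perm P := List.mergeSort_perm P pairLe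
    have hyspwle : ys.Pairwise (fun a b => pairLe a b = true) :=
      List.pairwise_mergeSort pairLe_trans
        (fun a b => by rcases pairLe_total a b with h | h <;> simp [h]) P
    have hPidx : P.Pairwise (fun a b => a.2 < b.2) := by
      refine List.Pairwise.map _ ?_ (PySem.List.pairwise_lt_enumerate ft 0)
      intro p q h
      simpa using by omega
    have hysne : ys.Pairwise (fun a b => a.2 ≠ b.2) :=
      (hysperm.pairwise_iff (fun h => h.symm)).mpr (hPidx.imp (fun h => by omega))
    have hyspw : ys.Pairwise lexLt := by
      refine (hyspwle.and hysne).imp ?_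
      rintro a b ⟨h1, h2⟩
      rw [pairLe_iff] at h1
      simp only [lexLt]
      omega
    have hheapys : (heapToList (P.foldl heappush PairHeap.nil)).Perm ys :=
      hperm0'.trans hysperm.symm
    have hsize : (P.foldl heappush PairHeap.nil).size = ft.length := by
      rw [size_eq_length_toList, hperm0'.length_eq]
      simp [hP, PySem.List.length_enumerate]
    obtain ⟨e1, e2, e3⟩ := sim k ft.length (P.foldl heappush PairHeap.nil) ys 0 0
      (ft.length : Int) hsize hok0 hheapys hyspw
    have hyslen : ((ys.length : Nat) : Int) = (ft.length : Int) := by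
      rw [hysperm.length_eq, hP, List.length_map, PySem.List.length_enumerate]
    -- the sweep's final state
    obtain ⟨d', p', s', hps, hsplit, hdone, hcase, hstop⟩ := sweep_post k ys 0 0 []
      (by simpa using hyspw) (by simp [Sval]) (by simp) (Or.inl ⟨rfl, rfl⟩)
    rw [hyslen] at hps
    simp only [List.nil_append] at hsplit
    -- min / max / the initial bracket of the binary search
    obtain ⟨mn, hmn⟩ : ∃ m, PySem.List.min? ft (fun t => t) = some m := by
      cases h : PySem.List.min? ft (fun t => t) with
      | none => exact absurd ((PySem.List.min?_eq_none_iff ft (fun t => t)).mp h) hftne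
      | some m => exact ⟨m, rfl⟩
    obtain ⟨mx, hmx⟩ : ∃ m, PySem.List.max? ft (fun t => t) = some m := by
      cases h : PySem.List.max? ft (fun t => t) with
      | none => exact absurd ((PySem.List.max?_eq_none_iff ft (fun t => t)).mp h) hftne
      | some m => exact ⟨m, rfl⟩
    have hmnmem : mn ∈ ft := PySem.List.min?_mem hmn
    have hmnmin : ∀ y ∈ ft, mn ≤ y := PySem.List.min?_isMin hmn
    have hmxmax : ∀ y ∈ ft, y ≤ mx := PySem.List.max?_isMax hmx
    have hn0 : (0 : Int) < (ft.length : Int) := by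
      rcases ft with _ | ⟨a, t⟩
      · exact absurd rfl hftne
      · simp
    rw [hmn, hmx, PySem.Int.floordiv_eq_ediv_of_pos hn0] at hv
    simp only [Option.getD_some] at hv
    have hcostlo : costB ft (min mn (k / (ft.length : Int))) ≤ k := by
      rw [costB_of_le ft _ (fun t ht => le_trans (min_le_left _ _) (hmnmin t ht))]
      have h2 : min mn (k / (ft.length : Int)) * (ft.length : Int)
          ≤ (k / (ft.length : Int)) * (ft.length : Int) :=
        mul_le_mul_of_nonneg_right (min_le_right _ _) (le_of_lt hn0)
      have h3 : (k / (ft.length : Int)) * (ft.length : Int) ≤ k :=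
        Int.ediv_mul_le k (by omega)
      omega
    have hcosthi : k < costB ft mx := by
      rw [costB_of_ge ft mx (fun t ht => hmxmax t ht)]
      omega
    have hlohi : min mn (k / (ft.length : Int)) < mx := by
      rcases lt_or_eq_of_le (le_trans (min_le_left mn _) (hmxmax mn hmnmem)) with h | h
      · exact h
      · rw [h] at hcostlo
        omega
    obtain ⟨hv1, hv2⟩ : costB ft v ≤ k ∧ k < costB ft (v + 1) := by
      rw [hv]
      exact bsearch_post ft k _ _ mx rfl hlohi hcostlo hcosthi
    -- costP on ys is costB
    have hconv : ∀ w, costP ys w = costB ft w := by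
      intro w
      rw [costP_perm ys P hysperm, hP, costP_P]
    -- the remaining suffix is nonempty
    obtain ⟨x0, rest0, rfl⟩ : ∃ x0 rest0, s' = x0 :: rest0 := by
      rcases s' with _ | ⟨a, b⟩
      · exfalso
        simp only [List.append_nil] at hsplit
        have hsv : Sval ys = ft.sum := by
          have h1 : Sval ys = Sval P := by
            unfold Sval
            exact (hysperm.map _).sum_eq
          rw [h1, hP, Sval_P]
        rcases hcase with ⟨hd0, _⟩ | ⟨_, hle⟩
        · rw [hsplit, hd0] at hsv
          simp [Sval] at hsv
          have : ft.length = 0 := by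
            have := hyslen
            rw [hsplit, hd0] at this
            simpa using this.symm
          rcases ft with _ | _
          · exact hftne rfl
          · simp at this
        · rw [hsplit] at hsv
          simp only [List.length_nil, Int.natCast_zero, Int.mul_zero, Int.add_zero] at hle
          omega
      · exact ⟨a, b, rfl⟩
    have hspw : (x0 :: rest0).Pairwise lexLt := by
      rw [hsplit] at hyspw
      exact (List.pairwise_append.mp hyspw).2.1
    have hs'head : ∀ y ∈ x0 :: rest0, x0.1 ≤ y.1 := by
      intro y hy
      rcases List.mem_cons.mp hy with rfl | hy
      · exact le_refl _
      · exact lexLt_val_le _ _ ((List.pairwise_cons.mp hspw).1 y hy)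
    have hstop' := hstop x0 rest0 rfl
    rw [not_le] at hstop'
    -- the key bracket facts linking the sweep state and the binary-search result
    have hkey : (∀ d ∈ d', d.1 ≤ v) ∧ (∀ y ∈ x0 :: rest0, v < y.1) ∧
        costB ft v = (Sval d' + p' * (((x0 :: rest0).length : Nat) : Int))
          + (v - p') * (((x0 :: rest0).length : Nat) : Int) := by
      rcases hcase with ⟨hd0, hp0⟩ | ⟨hall, hSVk⟩
      · subst hd0
        subst hp0
        simp only [List.nil_append] at hsplit
        have hcx : costB ft x0.1
            = x0.1 * (((x0 :: rest0).length : Nat) : Int) := by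
          rw [← hconv, hsplit]
          have := costP_split [] (x0 :: rest0) x0.1 (by simp) hs'head
          simpa [Sval] using this
        have hkx : k < costB ft x0.1 := by
          rw [hcx]
          simp only [Sval, List.map_nil, List.sum_nil] at hstop'
          have heq : (0 : Int) + 0 * (((x0 :: rest0).length : Nat) : Int)
              + (x0.1 - 0) * (((x0 :: rest0).length : Nat) : Int)
              = x0.1 * (((x0 :: rest0).length : Nat) : Int) := by ring
          rw [heq] at hstop'
          exact hstop'
        have hvx : v < x0.1 := by
          by_contra h
          simp only [not_lt] at h
          have := costB_mono ft x0.1 v h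
          omega
        refine ⟨by simp, fun y hy => lt_of_lt_of_le hvx (hs'head y hy), ?_⟩
        have := costP_split [] (x0 :: rest0) v (by simp)
          (fun y hy => le_of_lt (lt_of_lt_of_le hvx (hs'head y hy)))
        rw [← hconv, hsplit]
        simp only [List.nil_append] at this
        rw [this]
        simp [Sval]
      · have hcp : costB ft p' = Sval d' + p' * (((x0 :: rest0).length : Nat) : Int) := by
          rw [← hconv, hsplit]
          exact costP_split d' (x0 :: rest0) p' hdone hall
        have hpv : p' ≤ v := by
          by_contra h
          simp only [not_le] at h
          have h1 : v + 1 ≤ p' := by omega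
          have := costB_mono ft (v + 1) p' h1
          omega
        have hcx : costB ft x0.1 = Sval d' + x0.1 * (((x0 :: rest0).length : Nat) : Int) := by
          rw [← hconv, hsplit]
          exact costP_split d' (x0 :: rest0) x0.1
            (fun d hd2 => le_trans (hdone d hd2) (hall x0 List.mem_cons_self)) hs'head
        have hkx : k < costB ft x0.1 := by
          rw [hcx]
          have heq : Sval d' + p' * (((x0 :: rest0).length : Nat) : Int)
              + (x0.1 - p') * (((x0 :: rest0).length : Nat) : Int)
              = Sval d' + x0.1 * (((x0 :: rest0).length : Nat) : Int) := by ring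
          rw [heq] at hstop'
          exact hstop'
        have hvx : v < x0.1 := by
          by_contra h
          simp only [not_lt] at h
          have := costB_mono ft x0.1 v h
          omega
        refine ⟨fun d hd2 => le_trans (hdone d hd2) hpv,
          fun y hy => lt_of_lt_of_le hvx (hs'head y hy), ?_⟩
        have := costP_split d' (x0 :: rest0) v (fun d hd2 => le_trans (hdone d hd2) hpv)
          (fun y hy => le_of_lt (lt_of_lt_of_le hvx (hs'head y hy)))
        rw [← hconv, hsplit, this]
        ring
    obtain ⟨hK2, hK1, hK3⟩ := hkey
    -- the remaining pairs, in index order, are exactly B's filtered list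
    have hfil : ys.filter (fun q => decide (v < q.1)) = x0 :: rest0 := by
      rw [hsplit, List.filter_append]
      rw [List.filter_eq_nil_iff.mpr (fun d hd2 => by
        have := hK2 d hd2
        simp
        omega)]
      rw [List.filter_eq_self.mpr (fun y hy => by
        have := hK1 y hy
        simpa using this)]
      rfl
    have hFP : ((PySem.List.enumerate ft 0).filter (fun p => decide (v < p.2))).map
        (fun p => (p.2, p.1 + 1)) = P.filter (fun q => decide (v < q.1)) := by
      rw [hP, List.filter_map]
      rfl
    have hFperm : (((PySem.List.enumerate ft 0).filter (fun p => decide (v < p.2))).map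
        (fun p => (p.2, p.1 + 1))).Perm (x0 :: rest0) := by
      rw [hFP, ← hfil]
      exact (hysperm.filter _).symm
    have hFpw : (((PySem.List.enumerate ft 0).filter (fun p => decide (v < p.2))).map
        (fun p => (p.2, p.1 + 1))).Pairwise (fun a b => a.2 < b.2) := by
      refine List.Pairwise.map _ ?_
        ((PySem.List.pairwise_lt_enumerate ft 0).sublist List.filter_sublist)
      intro p q h
      simpa using by omega
    -- the A-side sorted call produces exactly that list
    have hsortA : PySem.List.sorted
        (heapToList (loopA k ft.length (P.foldl heappush PairHeap.nil) 0 0 (ft.length : Int)).1)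
        (fun x => x.2) false
        = ((PySem.List.enumerate ft 0).filter (fun p => decide (v < p.2))).map
          (fun p => (p.2, p.1 + 1)) := by
      refine PySem.List.sorted_eq_of_perm_of_pairwise_lt _ _ (fun x : Int × Int => x.2) ?_ hFpw
      rw [hps] at e3
      exact hFperm.trans e3.symm
    -- indices agree modulo the remaining length
    rw [hfold]
    unfold finishA
    rw [hps] at e1 e2
    rw [e1, e2, hsortA]
    have hremlen : (((PySem.List.enumerate ft 0).filter (fun p => decide (v < p.2))).map
        (fun p => (p.2, p.1 + 1))).length = (x0 :: rest0).length := hFperm.length_eq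
    have hL0 : (0 : Int) < (((x0 :: rest0).length : Nat) : Int) := by
      simp
    have hmodeq : PySem.Int.mod (k - (Sval d' + p' * (((x0 :: rest0).length : Nat) : Int)))
          (((x0 :: rest0).length : Nat) : Int)
        = PySem.Int.mod (k - costB ft v) (((x0 :: rest0).length : Nat) : Int) := by
      rw [PySem.Int.mod_eq_emod_of_pos hL0, PySem.Int.mod_eq_emod_of_pos hL0]
      have heq : k - costB ft v
          = (k - (Sval d' + p' * (((x0 :: rest0).length : Nat) : Int)))
            + (((x0 :: rest0).length : Nat) : Int) * (-(v - p')) := by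
        rw [hK3]
        ring
      rw [heq, Int.add_mul_emod_self_left]
    rw [hmodeq]
    have hlen2 : (((PySem.List.enumerate ft 0).filter (fun p => decide (v < p.2))).map
        (fun p => p.1 + 1)).length = ((x0 :: rest0).length : Nat) := by
      rw [List.length_map]
      rw [List.length_map] at hremlen
      exact hremlen
    have hmapsnd : (((PySem.List.enumerate ft 0).filter (fun p => decide (v < p.2))).map
        (fun p => (p.2, p.1 + 1))).map (fun q : Int × Int => q.2)
        = ((PySem.List.enumerate ft 0).filter (fun p => decide (v < p.2))).map
          (fun p => p.1 + 1) := by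
      rw [List.map_map]
      rfl
    rw [hlen2, ← hmapsnd, pyGet?_map, pyGet?_map, pyGet?_map]
    cases PySem.List.pyGet? ((PySem.List.enumerate ft 0).filter (fun p => decide (v < p.2)))
      (PySem.Int.mod (k - costB ft v) (((x0 :: rest0).length : Nat) : Int)) with
    | none => rfl
    | some p => rfl
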